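-- pv_equiv track=rewrite | github.com/highfestiva/retail-prototyper | behavior.py | group_articles
-- ===== SOURCE A (Python) =====
-- def group_articles(params, articles):
--     layout = params['layout']
--     if not layout//2%2:
--         return [[a] for a in articles]
--     # grouped layout
--     locations = (3, 7, 14)
--     groups = [[]]
--     for a in articles:
--         groups[-1] += [a]
--         if len(groups) in locations:
--             groups += [[]]
--         elif len(groups[-1]) == 4:
--             groups += [[]]
--     return groups
-- ===== SOURCE B (Python) =====
-- def group_articles(params, articles):
--     layout = params['layout']
--     if layout // 2 % 2 == 0:
--         return [[a] for a in articles]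
--     return _grouped(articles, 1)
--
-- def _grouped(rest, g):
--     cap = 1 if g in (3, 7, 14) else 4
--     if len(rest) < cap:
--         return [rest]
--     return [rest[:cap]] + _grouped(rest[cap:], g + 1)
-- ===== Notes on version B (the rewrite author's own statement) =====
-- stated objective: simpler
-- what changed: A builds groups incrementally, appending each article to the last group and bookkeeping when to open a new (possibly trailing empty) group; B computes each group's capacity from its position (1 at positions 3/7/14, else 4) and recursively splits the article list into take/drop chunks, the trailing empty group falling out of the recursion's base case.
import Mathlib
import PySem

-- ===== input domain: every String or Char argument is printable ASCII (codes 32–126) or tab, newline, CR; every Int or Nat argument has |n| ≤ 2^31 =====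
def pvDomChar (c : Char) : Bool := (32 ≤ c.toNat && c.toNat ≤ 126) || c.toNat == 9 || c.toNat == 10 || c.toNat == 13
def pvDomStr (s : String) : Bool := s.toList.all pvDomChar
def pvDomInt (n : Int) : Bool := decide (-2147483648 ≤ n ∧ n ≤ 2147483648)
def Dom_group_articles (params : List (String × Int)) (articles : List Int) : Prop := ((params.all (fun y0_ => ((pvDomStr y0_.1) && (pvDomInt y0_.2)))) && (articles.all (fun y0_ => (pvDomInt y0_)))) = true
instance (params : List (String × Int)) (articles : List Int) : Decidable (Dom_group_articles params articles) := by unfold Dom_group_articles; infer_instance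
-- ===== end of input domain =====

-- B replaces A's content-driven append-and-bookkeep loop by a capacity-driven recursive split
-- (objective: simpler); A raises KeyError when 'layout' is missing, excluded by Pre_.

-- ===== PORT A =====
-- one iteration of A's for-loop body (groups[-1] += [a]; then the two appends)
def gaStep (groups : List (List Int)) (a : Int) : List (List Int) :=
  let g1 := groups.dropLast ++ [(groups.getLast?.getD []) ++ [a]]
  if g1.length = 3 ∨ g1.length = 7 ∨ g1.length = 14 then g1 ++ [([] : List Int)]
  else if (g1.getLast?.getD []).length = 4 then g1 ++ [([] : List Int)]
  else g1

def group_articles (params : List (String × Int)) (articles : List Int) : List (List Int) :=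
  match params.find? (fun p => p.1 == "layout") with
  | none => []  -- KeyError in Python; excluded by Pre_
  | some (_, layout) =>
    if PySem.Int.mod (PySem.Int.floordiv layout 2) 2 = 0 then
      articles.map (fun a => [a])
    else
      articles.foldl gaStep [[]]

-- ===== PORT B =====
def gaCap (g : Nat) : Nat := if g = 3 ∨ g = 7 ∨ g = 14 then 1 else 4

def gaGrouped (rest : List Int) (g : Nat) : List (List Int) :=
  if _h : rest.length < gaCap g then [rest]
  else rest.take (gaCap g) :: gaGrouped (rest.drop (gaCap g)) (g + 1)
termination_by rest.length
decreasing_by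
  have hc : 1 ≤ gaCap g := by unfold gaCap; split <;> omega
  simp only [List.length_drop]; omega

def group_articles_alt (params : List (String × Int)) (articles : List Int) : List (List Int) :=
  match params.find? (fun p => p.1 == "layout") with
  | none => []  -- KeyError in Python; excluded by Pre_
  | some (_, layout) =>
    if PySem.Int.mod (PySem.Int.floordiv layout 2) 2 = 0 then
      articles.map (fun a => [a])
    else
      gaGrouped articles 1

-- ===== PRECONDITION & SPEC =====
-- Pre_ excludes exactly the inputs where params has no 'layout' key: A raises KeyError there.
def Pre_group_articles (params : List (String × Int)) (articles : List Int) : Prop :=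
  "layout" ∈ params.map Prod.fst
instance (params : List (String × Int)) (articles : List Int) : Decidable (Pre_group_articles params articles) := by unfold Pre_group_articles; infer_instance

def pvWitness_group_articles : (List (String × Int)) × List Int := ([("layout", 2)], [1, 2, 3])

-- A raises KeyError whenever no pair of params has key 'layout'; B raises there too, so no Raises_ block.

def Spec_group_articles (params : List (String × Int)) (articles : List Int) (out : List (List Int)) : Prop := out = group_articles_alt params articles
instance (params : List (String × Int)) (articles : List Int) (out : List (List Int)) : Decidable (Spec_group_articles params articles out) := by unfold Spec_group_articles; infer_instance

-- ===== CLAIM (what is proved, stated in full; the proofs are below) =====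
def Claim_equal_group_articles : Prop := ∀ (params : List (String × Int)) (articles : List Int), Dom_group_articles params articles → Pre_group_articles params articles → Spec_group_articles params articles (group_articles params articles)

-- ===== LEMMAS AND PROOFS =====

-- B's first group of `g`, already holding `cur`, completed from `rest`
def gaFill (cur : List Int) (rest : List Int) (g : Nat) : List (List Int) :=
  if rest.length < gaCap g - cur.length then [cur ++ rest]
  else (cur ++ rest.take (gaCap g - cur.length)) :: gaGrouped (rest.drop (gaCap g - cur.length)) (g + 1)

theorem gaFill_nil (rest : List Int) (g : Nat) : gaFill [] rest g = gaGrouped rest g := by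
  rw [gaGrouped]
  simp [gaFill]

theorem gaFill_cons (cur : List Int) (a : Int) (rest : List Int) (g : Nat)
    (h : cur.length + 1 < gaCap g) :
    gaFill cur (a :: rest) g = gaFill (cur ++ [a]) rest g := by
  unfold gaFill
  have h1 : gaCap g - cur.length = (gaCap g - (cur ++ [a]).length) + 1 := by
    simp only [List.length_append, List.length_cons, List.length_nil]; omega
  rw [h1]
  simp only [List.length_cons, List.take_succ_cons, List.drop_succ_cons,
    Nat.add_lt_add_iff_right, List.append_assoc, List.cons_append, List.nil_append]

theorem gaLoop (rest : List Int) : ∀ (done : List (List Int)) (cur : List Int),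
    cur.length < gaCap (done.length + 1) →
    rest.foldl gaStep (done ++ [cur]) = done ++ gaFill cur rest (done.length + 1) := by
  induction rest with
  | nil =>
    intro done cur h
    simp only [List.foldl_nil, gaFill]
    rw [if_pos (by simp only [List.length_nil]; omega)]
    simp
  | cons a rest ih =>
    intro done cur h
    have hstep : gaStep (done ++ [cur]) a =
        if done.length + 1 = 3 ∨ done.length + 1 = 7 ∨ done.length + 1 = 14 then
          (done ++ [cur ++ [a]]) ++ [([] : List Int)]
        else if (cur ++ [a]).length = 4 then (done ++ [cur ++ [a]]) ++ [([] : List Int)]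
        else done ++ [cur ++ [a]] := by
      unfold gaStep
      simp [List.dropLast_concat, List.getLast?_concat]
    by_cases hg : done.length + 1 = 3 ∨ done.length + 1 = 7 ∨ done.length + 1 = 14
    · -- capacity-1 group: cur must be empty
      have hcap : gaCap (done.length + 1) = 1 := by unfold gaCap; rw [if_pos hg]
      have hcur : cur = [] := by
        rw [hcap] at h
        exact List.eq_nil_of_length_eq_zero (by omega)
      subst hcur
      rw [List.foldl_cons, hstep, if_pos hg]
      have hcap' : 0 < gaCap (done.length + 1 + 1) := by unfold gaCap; split <;> omega
      have := ih (done ++ [[a]]) [] (by simpa using hcap')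
      simp only [List.length_append, List.length_cons, List.length_nil, List.nil_append] at this ⊢
      rw [show done ++ [[a]] ++ [([] : List Int)] = (done ++ [[a]]) ++ [([] : List Int)] from rfl, this]
      rw [gaFill_nil]
      unfold gaFill
      rw [hcap]
      simp only [List.length_cons, Nat.sub_zero, List.length_nil]
      rw [if_neg (by omega)]
      simp [List.dropLast_concat, List.getLast?_concat]
    · have hcap : gaCap (done.length + 1) = 4 := by unfold gaCap; rw [if_neg hg]
      by_cases h4 : (cur ++ [a]).length = 4
      · -- group filled: new empty group appended
        rw [List.foldl_cons, hstep, if_neg hg, if_pos h4]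
        have hcap' : 0 < gaCap (done.length + 1 + 1) := by unfold gaCap; split <;> omega
        have := ih (done ++ [cur ++ [a]]) [] (by simpa using hcap')
        simp only [List.length_append, List.length_cons, List.length_nil, List.nil_append] at this ⊢
        rw [this, gaFill_nil]
        unfold gaFill
        rw [hcap]
        simp only [List.length_append, List.length_cons, List.length_nil] at h4
        have hne : cur.length = 3 := by omega
        simp only [List.length_cons, hne]
        rw [if_neg (by omega)]
        simp
      · -- group not yet full: stay in the same group
        rw [List.foldl_cons, hstep, if_neg hg, if_neg h4]
        simp only [List.length_append, List.length_cons, List.length_nil] at h4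
        have := ih done (cur ++ [a]) (by simp only [List.length_append, List.length_cons, List.length_nil]; omega)
        rw [this, gaFill_cons cur a rest (done.length + 1) (by omega)]

theorem gaMain (articles : List Int) : articles.foldl gaStep [[]] = gaGrouped articles 1 := by
  have := gaLoop articles [] [] (by unfold gaCap; simp)
  simpa [gaFill_nil] using this

-- ===== VERDICT (by name: the statement is the Claim_ definition above) =====
theorem group_articles_spec : Claim_equal_group_articles := by
  intro params articles _ _
  unfold Spec_group_articles group_articles group_articles_alt
  cases params.find? (fun p => p.1 == "layout") with
  | none => rfl
  | some kv =>
    cases kv with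
    | mk k layout =>
      dsimp only
      by_cases h : PySem.Int.mod (PySem.Int.floordiv layout 2) 2 = 0
      · rw [if_pos h, if_pos h]
      · rw [if_neg h, if_neg h]; exact gaMain articles
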